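-- pv_equiv track=rewrite | github.com/jeffreyhodes/RomanNumeralAnalyzer | pychord.py | with_slash
-- ===== SOURCE A (Python) =====
-- def with_slash(s):
--   if len(s) < 1:
--     return s
--   result = [s[0]]
--   for i in range(1, len(s)):
--     if s[i] in '123456789' and s[i - 1] in '123456789':
--       result.append('/')
--     result.append(s[i])
--   return ''.join(result)
-- ===== SOURCE B (Python) =====
-- def with_slash(s):
--     digits = '123456789'
--     out = []
--     i = 0
--     n = len(s)
--     while i < n:
--         if s[i] in digits:
--             j = i
--             while j < n and s[j] in digits:
--                 j += 1
--             out.append('/'.join(s[i:j]))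
--             i = j
--         else:
--             out.append(s[i])
--             i += 1
--     return ''.join(out)
-- ===== Notes on version B (the rewrite author's own statement) =====
-- stated objective: alternative
-- what changed: Replaces A's per-index pass that compares each character with its predecessor by a run-based tokenizer: an outer loop scans maximal runs of nonzero digits and emits each run joined with slashes, copying non-digit characters through.
import Mathlib
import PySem

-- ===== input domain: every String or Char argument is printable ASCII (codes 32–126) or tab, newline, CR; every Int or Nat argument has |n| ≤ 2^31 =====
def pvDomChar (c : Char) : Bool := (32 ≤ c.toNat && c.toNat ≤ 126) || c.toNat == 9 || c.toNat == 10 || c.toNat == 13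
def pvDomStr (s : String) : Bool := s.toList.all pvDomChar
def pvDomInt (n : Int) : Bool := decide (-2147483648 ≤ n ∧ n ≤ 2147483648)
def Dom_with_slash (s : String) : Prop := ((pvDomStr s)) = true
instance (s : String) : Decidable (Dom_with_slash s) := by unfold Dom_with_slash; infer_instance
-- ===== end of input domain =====

-- B: scans maximal runs of nonzero digits and joins each run with '/', instead of A's per-index predecessor comparison.


-- ===== PORT A =====
-- membership 'c in "123456789"' is ported as char-in-list, exact for single characters
def pvDigitsA : List Char := "123456789".toList

def with_slash (s : String) : String :=
  if (PySem.Str.len s) < 1 then s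
  else
    let cs := s.toList
    let result :=
      (PySem.List.pyRange 1 (PySem.Str.len s) 1).foldl
        (fun r i =>
          let r := if PySem.List.pyGetD cs i ' ' ∈ pvDigitsA ∧
                      PySem.List.pyGetD cs (i - 1) ' ' ∈ pvDigitsA
                   then r ++ ['/'] else r
          r ++ [PySem.List.pyGetD cs i ' '])
        [PySem.List.pyGetD cs 0 ' ']
    String.ofList result

-- ===== PORT B =====
def pvDigitsB : List Char := "123456789".toList

-- B's outer while loop over maximal digit runs: the inner 'while j < n and s[j] in digits'
-- plus the slice s[i:j] is List.takeWhile/dropWhile on the suffix; '/'.join is List.intersperse.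
def pvRunOut : List Char → List Char
  | [] => []
  | c :: rest =>
    if h : c ∈ pvDigitsB then
      List.intersperse '/' (List.takeWhile (fun x => decide (x ∈ pvDigitsB)) (c :: rest))
        ++ pvRunOut (List.dropWhile (fun x => decide (x ∈ pvDigitsB)) (c :: rest))
    else c :: pvRunOut rest
termination_by cs => cs.length
decreasing_by
  · rw [List.dropWhile_cons_of_pos (by simpa using h)]
    exact Nat.lt_succ_of_le (List.length_dropWhile_le _ _)
  · simp

def with_slash_alt (s : String) : String :=
  String.ofList (pvRunOut s.toList)

-- ===== PRECONDITION & SPEC =====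
def Spec_with_slash (s : String) (out : String) : Prop := out = with_slash_alt s
instance (s : String) (out : String) : Decidable (Spec_with_slash s out) := by unfold Spec_with_slash; infer_instance

-- ===== CLAIM (what is proved, stated in full; the proofs are below) =====
def Claim_equal_with_slash : Prop := ∀ (s : String), Dom_with_slash s → Spec_with_slash s (with_slash s)

-- ===== LEMMAS AND PROOFS =====

-- proof-side intermediate form: the pairwise output of A's loop body, for the tail of the string
def pvPairsOut : List Char → List Char
  | a :: b :: rest =>
      (if b ∈ pvDigitsA ∧ a ∈ pvDigitsA then ['/', b] else [b]) ++ pvPairsOut (b :: rest)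
  | _ => []

-- appending one character to a nonempty list handles exactly one more pair, at the end
theorem pvPairsOut_snoc (xs : List Char) (y : Char) (h : xs ≠ []) :
    pvPairsOut (xs ++ [y]) =
      pvPairsOut xs ++
        (if y ∈ pvDigitsA ∧ xs.getD (xs.length - 1) ' ' ∈ pvDigitsA then ['/', y] else [y]) := by
  induction xs with
  | nil => simp at h
  | cons a t ih =>
    cases t with
    | nil => simp [pvPairsOut]
    | cons b u =>
      have := ih (by simp)
      simp only [List.cons_append] at this ⊢
      rw [pvPairsOut, pvPairsOut, this]
      simp only [List.append_assoc, List.getD, List.length_cons,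
        Nat.add_sub_cancel, List.getElem?_cons_succ]

-- A's fold over range(1, k) builds head ++ pvPairsOut of the k-prefix
theorem pvFold_eq (cs : List Char) (k : Nat) (h1 : 1 ≤ k) (h2 : k ≤ cs.length) :
    (PySem.List.pyRange 1 (k : Int) 1).foldl
      (fun r i =>
        let r := if PySem.List.pyGetD cs i ' ' ∈ pvDigitsA ∧
                    PySem.List.pyGetD cs (i - 1) ' ' ∈ pvDigitsA
                 then r ++ ['/'] else r
        r ++ [PySem.List.pyGetD cs i ' '])
      [PySem.List.pyGetD cs 0 ' ']
    = cs.take 1 ++ pvPairsOut (cs.take k) := by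
  induction k with
  | zero => omega
  | succ k ih =>
    rcases Nat.lt_or_ge k 1 with hk | hk
    · have hk0 : k = 0 := by omega
      subst hk0
      obtain ⟨c, cs', rfl⟩ : ∃ c cs', cs = c :: cs' := by
        cases cs with
        | nil => simp at h2
        | cons c cs' => exact ⟨c, cs', rfl⟩
      simp [PySem.List.pyRange_one_eq_nil, pvPairsOut, PySem.List.pyGetD_zero_cons]
    · have hrange : PySem.List.pyRange 1 ((k : Int) + 1) 1 =
          PySem.List.pyRange 1 (k : Int) 1 ++ [(k : Int)] :=
        PySem.List.pyRange_one_succ_right (by exact_mod_cast hk)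
      have hcast : ((k + 1 : Nat) : Int) = (k : Int) + 1 := by push_cast; ring
      rw [hcast, hrange, List.foldl_append, ih hk (by omega)]
      have hklt : k < cs.length := by omega
      have hgk : PySem.List.pyGetD cs (k : Int) ' ' = cs.getD k ' ' := by
        simp [PySem.List.pyGetD_natCast]
      have hgk1 : PySem.List.pyGetD cs ((k : Int) - 1) ' ' = cs.getD (k - 1) ' ' := by
        have : ((k : Int) - 1) = ((k - 1 : Nat) : Int) := by omega
        rw [this]; simp [PySem.List.pyGetD_natCast]
      have htake : cs.take (k + 1) = cs.take k ++ [cs.getD k ' '] := by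
        rw [List.take_add_one]
        congr 1
        have : cs[k]? = some cs[k] := List.getElem?_eq_getElem hklt
        simp [this, List.getD]
      have hne : cs.take k ≠ [] := by
        have : (cs.take k).length = k := List.length_take_of_le (by omega)
        intro hc; rw [hc] at this; simp at this; omega
      rw [htake, pvPairsOut_snoc _ _ hne]
      have hlast : (cs.take k).getD ((cs.take k).length - 1) ' ' = cs.getD (k - 1) ' ' := by
        have hlen : (cs.take k).length = k := List.length_take_of_le (by omega)
        rw [hlen]
        have hlt : k - 1 < k := by omega
        simp [List.getD, hlt]
      rw [hlast]
      simp only [List.foldl_cons, List.foldl_nil, hgk, hgk1]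
      by_cases hc : cs.getD k ' ' ∈ pvDigitsA ∧ cs.getD (k - 1) ' ' ∈ pvDigitsA
      · rw [if_pos hc, if_pos hc]
        simp [List.getD, List.append_assoc]
      · rw [if_neg hc, if_neg hc]
        simp [List.getD, List.append_assoc]

-- B's run scan equals head ++ pairwise output
theorem pvRunOut_eq (cs : List Char) : pvRunOut cs = cs.take 1 ++ pvPairsOut cs := by
  induction cs with
  | nil => simp [pvRunOut, pvPairsOut]
  | cons a t ih =>
    cases t with
    | nil =>
      by_cases ha : a ∈ pvDigitsB
      · simp [pvRunOut, ha, pvPairsOut, List.takeWhile, List.dropWhile]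
      · simp [pvRunOut, ha, pvPairsOut]
    | cons b rest =>
      by_cases ha : a ∈ pvDigitsB
      · by_cases hb : b ∈ pvDigitsB
        · rw [pvRunOut, dif_pos ha]
          rw [List.takeWhile_cons_of_pos (by simpa using ha),
              List.takeWhile_cons_of_pos (by simpa using hb),
              List.dropWhile_cons_of_pos (by simpa using ha),
              List.dropWhile_cons_of_pos (by simpa using hb)]
          rw [pvRunOut, dif_pos hb,
              List.takeWhile_cons_of_pos (by simpa using hb),
              List.dropWhile_cons_of_pos (by simpa using hb)] at ih
          have hcond : b ∈ pvDigitsA ∧ a ∈ pvDigitsA := ⟨hb, ha⟩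
          rw [pvPairsOut, if_pos hcond]
          simp only [List.intersperse, List.take, List.cons_append, List.nil_append] at ih ⊢
          rw [ih]
        · rw [pvRunOut, dif_pos ha]
          rw [List.takeWhile_cons_of_pos (by simpa using ha),
              List.takeWhile_cons_of_neg (by simpa using hb),
              List.dropWhile_cons_of_pos (by simpa using ha),
              List.dropWhile_cons_of_neg (by simpa using hb)]
          have hcond : ¬ (b ∈ pvDigitsA ∧ a ∈ pvDigitsA) := fun h => hb h.1
          rw [pvPairsOut, if_neg hcond]
          simp [List.intersperse, ih]
      · rw [pvRunOut, dif_neg ha]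
        have hcond : ¬ (b ∈ pvDigitsA ∧ a ∈ pvDigitsA) := fun h => ha h.2
        rw [pvPairsOut, if_neg hcond]
        simp [ih]

-- ===== VERDICT (by name: the statement is the Claim_ definition above) =====
theorem with_slash_spec : Claim_equal_with_slash := by
  intro s _
  unfold Spec_with_slash with_slash with_slash_alt
  have hlenI : PySem.Str.len s = ((s.toList.length : Nat) : Int) := by
    simp [PySem.Str.len_eq, String.length_toList]
  rw [hlenI]
  by_cases h : ((s.toList.length : Nat) : Int) < 1
  · have hnil : s.toList = [] := by
      have : s.toList.length = 0 := by omega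
      exact List.eq_nil_of_length_eq_zero this
    rw [if_pos h]
    have hs : s = "" := String.toList_eq_nil_iff.mp hnil
    subst hs
    rw [hnil]
    simp [pvRunOut]
  · rw [if_neg h]
    have hlen : 1 ≤ s.toList.length := by omega
    rw [pvRunOut_eq]
    simp only [pvFold_eq s.toList s.toList.length hlen le_rfl,
      List.take_of_length_le (le_refl s.toList.length)]
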